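-- pv_equiv track=rewrite | github.com/KubaBBB/NLP | lab3/main.py | pre_process_cluster
-- ===== SOURCE A (Python) =====
-- def pre_process_cluster(file):
--     clusters = dict()
--     index = 0;
--     for item in file:
--         if(item != '\n'):
--             if(item == '##########\n'):
--                 index+=1;
--             else:
--                 clusters[item] = index;
--     return clusters;
-- ===== SOURCE B (Python) =====
-- def pre_process_cluster(file):
--     # Partition into segments delimited by the separator, then assign
--     # cluster indices segment by segment with enumerate.
--     segments = []
--     current = []
--     for item in file:
--         if item == '##########\n':
--             segments.append(current)
--             current = []
--         else:
--             current.append(item)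
--     segments.append(current)
--     clusters = {}
--     for idx, seg in enumerate(segments):
--         for line in seg:
--             if line != '\n':
--                 clusters[line] = idx
--     return clusters
-- ===== Notes on version B (the rewrite author's own statement) =====
-- stated objective: alternative
-- what changed: Replaced the single counter-threaded loop by a two-phase shape: first partition the lines into separator-delimited segments (keeping empty segments), then a nested enumerate pass assigns each non-'\n' line its segment index.
import Mathlib
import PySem

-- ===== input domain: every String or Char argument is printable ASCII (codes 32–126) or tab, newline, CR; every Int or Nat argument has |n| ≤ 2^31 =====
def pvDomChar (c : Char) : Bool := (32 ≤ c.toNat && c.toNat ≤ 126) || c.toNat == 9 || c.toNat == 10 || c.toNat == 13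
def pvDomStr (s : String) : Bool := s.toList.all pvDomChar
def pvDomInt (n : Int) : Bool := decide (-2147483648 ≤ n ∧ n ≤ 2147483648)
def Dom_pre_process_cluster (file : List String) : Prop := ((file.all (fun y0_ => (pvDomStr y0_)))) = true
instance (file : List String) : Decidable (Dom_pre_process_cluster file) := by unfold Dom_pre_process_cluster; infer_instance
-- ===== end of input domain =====

-- B partitions the lines into separator-delimited segments first, then assigns indices in a nested enumerate pass; same return value as A (alternative decomposition, no speed claim).

-- ===== PORT A =====
-- A: one pass threading (clusters, index) through the file.
def pre_process_cluster (file : List String) : List (String × Int) :=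
  (file.foldl
    (fun (st : PySem.Dict String Int × Int) item =>
      if item ≠ "\n" then
        if item = "##########\n" then (st.1, st.2 + 1)
        else (st.1.insert item st.2, st.2)
      else st)
    (PySem.Dict.empty, 0)).1.items

-- ===== PORT B =====
-- phase 1 of Source B: partition into segments, state = (finished segments, current segment)
def pvSegStep (st : List (List String) × List String) (item : String) :
    List (List String) × List String :=
  if item = "##########\n" then (st.1 ++ [st.2], [])
  else (st.1, st.2 ++ [item])

-- phase 2 of Source B: `for idx, seg in enumerate(segments)` with the inner line loop
def pvAssign (d : PySem.Dict String Int) (idx : Int) :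
    List (List String) → PySem.Dict String Int
  | [] => d
  | seg :: rest =>
      pvAssign (seg.foldl (fun d line => if line ≠ "\n" then d.insert line idx else d) d)
        (idx + 1) rest

def pre_process_cluster_alt (file : List String) : List (String × Int) :=
  (pvAssign PySem.Dict.empty 0
    ((file.foldl pvSegStep ([], [])).1 ++ [(file.foldl pvSegStep ([], [])).2])).items

-- ===== PRECONDITION & SPEC =====
def Spec_pre_process_cluster (file : List String) (out : List (String × Int)) : Prop := out = pre_process_cluster_alt file
instance (file : List String) (out : List (String × Int)) : Decidable (Spec_pre_process_cluster file out) := by unfold Spec_pre_process_cluster; infer_instance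

-- ===== CLAIM (what is proved, stated in full; the proofs are below) =====
def Claim_equal_pre_process_cluster : Prop := ∀ (file : List String), Dom_pre_process_cluster file → Spec_pre_process_cluster file (pre_process_cluster file)

-- ===== LEMMAS AND PROOFS =====

-- proof-side characterisation of the segment list
def pvSplit : List String → List (List String)
  | [] => [[]]
  | x :: xs =>
      if x = "##########\n" then [] :: pvSplit xs
      else match pvSplit xs with
           | [] => [[x]]
           | h :: t => (x :: h) :: t

theorem pvSplit_ne_nil (xs : List String) : pvSplit xs ≠ [] := by
  induction xs with
  | nil => simp [pvSplit]
  | cons x xs ih =>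
    simp only [pvSplit]
    split
    · simp
    · cases h : pvSplit xs <;> simp

theorem pvSegStep_split (file : List String) : ∀ (segs : List (List String)) (cur : List String),
    (file.foldl pvSegStep (segs, cur)).1 ++ [(file.foldl pvSegStep (segs, cur)).2]
      = segs ++ (match pvSplit file with
                 | [] => [cur]
                 | h :: t => (cur ++ h) :: t) := by
  induction file with
  | nil => intro segs cur; simp [pvSplit]
  | cons x xs ih =>
    intro segs cur
    by_cases hx : x = "##########\n"
    · simp only [List.foldl_cons, pvSegStep, hx, pvSplit, ih]
      cases h : pvSplit xs with
      | nil => exact absurd h (pvSplit_ne_nil xs)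
      | cons h' t => simp
    · simp only [List.foldl_cons, pvSegStep, if_neg hx, pvSplit, ih]
      cases h : pvSplit xs with
      | nil => exact absurd h (pvSplit_ne_nil xs)
      | cons h' t => simp

theorem pvA_assign (file : List String) : ∀ (d : PySem.Dict String Int) (n : Int),
    (file.foldl
      (fun (st : PySem.Dict String Int × Int) item =>
        if item ≠ "\n" then
          if item = "##########\n" then (st.1, st.2 + 1)
          else (st.1.insert item st.2, st.2)
        else st)
      (d, n)).1 = pvAssign d n (pvSplit file) := by
  induction file with
  | nil => intro d n; simp [pvSplit, pvAssign]
  | cons x xs ih =>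
    intro d n
    by_cases hnl : x = "\n"
    · subst hnl
      have hsep : ("\n" : String) ≠ "##########\n" := by decide
      simp only [List.foldl_cons, ne_eq, not_true_eq_false, if_false, ih, pvSplit,
        if_neg hsep]
      cases h : pvSplit xs with
      | nil => exact absurd h (pvSplit_ne_nil xs)
      | cons h' t =>
        simp [pvAssign, List.foldl_cons]
    · by_cases hsep : x = "##########\n"
      · subst hsep
        rw [List.foldl_cons, if_pos (by decide : ("##########\n" : String) ≠ "\n"),
          if_pos rfl, ih]
        simp [pvSplit, pvAssign]
      · rw [List.foldl_cons, if_pos hnl, if_neg hsep, ih]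
        simp only [pvSplit, if_neg hsep]
        cases h : pvSplit xs with
        | nil => simp [pvAssign, List.foldl_cons, hnl]
        | cons h' t => simp [pvAssign, List.foldl_cons, hnl]

-- ===== VERDICT (by name: the statement is the Claim_ definition above) =====
theorem pre_process_cluster_spec : Claim_equal_pre_process_cluster := by
  intro file _
  unfold Spec_pre_process_cluster pre_process_cluster pre_process_cluster_alt
  have hseg := pvSegStep_split file [] []
  cases h : pvSplit file with
  | nil => exact absurd h (pvSplit_ne_nil file)
  | cons h' t =>
    rw [h] at hseg
    simp only [List.nil_append] at hseg
    rw [pvA_assign file PySem.Dict.empty 0, h, hseg]
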